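-- pv_equiv track=rewrite | github.com/Luciuss04/PoseidonUI | bot/cogs/juegos/mascotas.py | _add_xp
-- ===== SOURCE A (Python) =====
-- def _add_xp(pet, amount):
--     pet['xp'] += amount
--     msg = ""
--     # Level up logic
--     while pet['xp'] >= 100:
--         pet['xp'] -= 100
--         pet['level'] += 1
--         msg += f"\n🆙 **¡SUBIÓ DE NIVEL!** Ahora es nivel {pet['level']}."
--     return msg
-- ===== SOURCE B (Python) =====
-- def _add_xp(pet, amount):
--     pet['xp'] += amount
--     xp = pet['xp']
--     levels = xp // 100 if xp >= 100 else 0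
--     if levels == 0:
--         return ""
--     pet['xp'] = xp - levels * 100
--     base = pet['level']
--     pet['level'] = base + levels
--     return "".join(
--         f"\n🆙 **¡SUBIÓ DE NIVEL!** Ahora es nivel {base + i + 1}."
--         for i in range(levels)
--     )
-- ===== Notes on version B (the rewrite author's own statement) =====
-- stated objective: alternative
-- what changed: A's while loop subtracts 100 per level while accumulating the message; B computes the level gain in closed form (xp // 100), updates xp/level with O(1) arithmetic, and builds the identical message in a separate range(levels) pass.
import Mathlib
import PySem

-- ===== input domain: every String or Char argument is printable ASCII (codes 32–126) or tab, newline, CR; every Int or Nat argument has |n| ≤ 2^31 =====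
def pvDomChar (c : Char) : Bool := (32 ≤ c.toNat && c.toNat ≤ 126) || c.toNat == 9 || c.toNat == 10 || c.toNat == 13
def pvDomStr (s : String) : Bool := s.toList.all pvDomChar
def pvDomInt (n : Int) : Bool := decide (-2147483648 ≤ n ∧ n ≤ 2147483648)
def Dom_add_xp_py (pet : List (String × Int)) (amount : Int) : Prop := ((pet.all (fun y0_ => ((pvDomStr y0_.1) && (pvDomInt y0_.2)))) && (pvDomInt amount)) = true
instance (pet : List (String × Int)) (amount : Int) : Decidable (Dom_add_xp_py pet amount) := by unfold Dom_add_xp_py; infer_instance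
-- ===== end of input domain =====

-- B replaces A's subtract-100-per-iteration while loop by an O(1) closed-form level
-- computation (xp // 100) followed by a separate message-building pass over range(levels).
-- Both A and B mutate pet identically; the equivalence proved here is about the RETURN value.

-- ===== PORT A =====
-- the f-string line A appends for a pet that just reached level `lvl`
def pvLine (lvl : Int) : String :=
  "\n🆙 **¡SUBIÓ DE NIVEL!** Ahora es nivel " ++ PySem.Int.toStr lvl ++ "."

-- A's while loop: state (xp, level, msg); terminates because xp drops by 100 each turn
def pvLoopA (xp level : Int) (msg : String) : String :=
  if 100 ≤ xp then
    pvLoopA (xp - 100) (level + 1) (msg ++ pvLine (level + 1))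
  else msg
termination_by xp.toNat
decreasing_by omega

def add_xp_py (pet : List (String × Int)) (amount : Int) : String :=
  -- pet['xp'] += amount ; then the while loop (pet['level'] read on first iteration; Pre_ guarantees both lookups)
  pvLoopA ((pet.lookup "xp").getD 0 + amount) ((pet.lookup "level").getD 0) ""

-- ===== PORT B =====
def add_xp_py_alt (pet : List (String × Int)) (amount : Int) : String :=
  let xp := (pet.lookup "xp").getD 0 + amount
  let levels := if 100 ≤ xp then PySem.Int.floordiv xp 100 else 0
  if levels == 0 then ""
  else
    let base := (pet.lookup "level").getD 0
    String.join ((PySem.List.pyRange 0 levels 1).map (fun i => pvLine (base + i + 1)))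

-- ===== PRECONDITION & SPEC =====
-- Pre_ excludes exactly the inputs where Python A raises KeyError: 'xp' missing, or
-- the loop runs (xp+amount ≥ 100) while 'level' is missing.
def Pre_add_xp_py (pet : List (String × Int)) (amount : Int) : Prop :=
  (pet.lookup "xp").isSome = true ∧
  (100 ≤ (pet.lookup "xp").getD 0 + amount → (pet.lookup "level").isSome = true)

instance (pet : List (String × Int)) (amount : Int) : Decidable (Pre_add_xp_py pet amount) := by
  unfold Pre_add_xp_py; infer_instance

def pvWitness_add_xp_py : (List (String × Int)) × Int := ([("xp", 50), ("level", 1)], 175)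

def Spec_add_xp_py (pet : List (String × Int)) (amount : Int) (out : String) : Prop := out = add_xp_py_alt pet amount
instance (pet : List (String × Int)) (amount : Int) (out : String) : Decidable (Spec_add_xp_py pet amount out) := by unfold Spec_add_xp_py; infer_instance

-- ===== CLAIM (what is proved, stated in full; the proofs are below) =====
def Claim_equal_add_xp_py : Prop := ∀ (pet : List (String × Int)) (amount : Int), Dom_add_xp_py pet amount → Pre_add_xp_py pet amount → Spec_add_xp_py pet amount (add_xp_py pet amount)

-- ===== LEMMAS AND PROOFS =====

theorem join_cons' (a : String) (l : List String) :
    String.join (a :: l) = a ++ String.join l := by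
  suffices h : ∀ (l : List String) (a : String),
      l.foldl (· ++ ·) a = a ++ l.foldl (· ++ ·) "" by
    simpa [String.join] using h l a
  intro l
  induction l with
  | nil => intro a; simp
  | cons x xs ih =>
    intro a
    simp only [List.foldl_cons]
    rw [ih (a ++ x), ih ("" ++ x), String.append_assoc]
    simp

theorem floordiv_eq_ediv (a : Int) : PySem.Int.floordiv a 100 = a / 100 := by
  simp only [PySem.Int.floordiv]
  exact Int.fdiv_eq_ediv_of_nonneg a (by norm_num)

-- B's message for `k` levels gained starting at level `base`
def pvMsgB (k base : Int) : String :=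
  String.join ((PySem.List.pyRange 0 k 1).map (fun i => pvLine (base + i + 1)))

theorem msgB_zero (base : Int) (k : Int) (hk : k ≤ 0) : pvMsgB k base = "" := by
  simp [pvMsgB, PySem.List.pyRange_one_eq_nil hk, String.join]

theorem msgB_succ (k base : Int) (hk : 1 ≤ k) :
    pvMsgB k base = pvLine (base + 1) ++ pvMsgB (k - 1) (base + 1) := by
  unfold pvMsgB
  rw [PySem.List.pyRange_one_cons (by omega : (0:Int) < k)]
  rw [List.map_cons, join_cons']
  congr 1
  · simp
  · rw [PySem.List.pyRange_one, PySem.List.pyRange_one]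
    simp only [List.map_map]
    have hlen : (k - (0 + 1)).toNat = (k - 1 - 0).toNat := by omega
    rw [hlen]
    congr 1
    apply List.map_congr_left
    intro j _
    simp only [Function.comp]
    congr 1
    omega

theorem loopA_eq (n : ℕ) : ∀ (xp level : Int) (msg : String),
    xp.toNat ≤ n →
    pvLoopA xp level msg =
      msg ++ pvMsgB (if 100 ≤ xp then PySem.Int.floordiv xp 100 else 0) level := by
  induction n with
  | zero =>
    intro xp level msg h
    unfold pvLoopA
    have hxp : ¬ 100 ≤ xp := by omega
    simp [hxp, msgB_zero level 0 le_rfl]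
  | succ n ih =>
    intro xp level msg h
    unfold pvLoopA
    by_cases hxp : 100 ≤ xp
    · simp only [hxp, if_pos]
      rw [ih (xp - 100) (level + 1) _ (by omega)]
      have hk : 1 ≤ PySem.Int.floordiv xp 100 := by
        rw [floordiv_eq_ediv]; omega
      rw [msgB_succ _ _ hk, ← String.append_assoc]
      congr 2
      by_cases h2 : 100 ≤ xp - 100 <;>
        simp only [h2, if_pos, if_neg, not_false_iff, floordiv_eq_ediv] <;> omega
    · simp [hxp, msgB_zero level 0 le_rfl]

-- ===== VERDICT (by name: the statement is the Claim_ definition above) =====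
theorem add_xp_py_spec : Claim_equal_add_xp_py := by
  intro pet amount _ _
  unfold Spec_add_xp_py add_xp_py add_xp_py_alt
  rw [loopA_eq ((pet.lookup "xp").getD 0 + amount).toNat _ _ _ le_rfl]
  set xp := (pet.lookup "xp").getD 0 + amount with hxp
  by_cases h : 100 ≤ xp
  · have hk : ¬ (xp / 100 = 0) := by omega
    simp [h, hk, pvMsgB]
  · simp [h, pvMsgB, String.join]
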